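-- pv_equiv track=rewrite | github.com/finnfujimura/LEI-SRML-Intern-Project | Data/clean_stw_data.py | expand_hhmm_ranges
-- ===== SOURCE A (Python) =====
-- def parse_int(value: str) -> int | None:
--     """Try to convert a string to an integer; return None instead of raising."""
--     try:
--         return int(value.strip())
--     except ValueError:
--         return None
--
-- def is_valid_hhmm(value: int) -> bool:
--     """Return True if *value* is a legal HHMM timestamp (0001--2359 or 2400)."""
--     if value == 2400:
--         return True
--     if value < 1 or value > 2359:
--         return False
--     hh = value // 100
--     mm = value % 100
--     return 0 <= hh <= 23 and 0 <= mm <= 59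
--
-- def hhmm_to_minute_index(value: int) -> int:
--     """Convert an HHMM value to a 0-based minute index (0--1439).
--
--     ``0001 -> 0``, ``0002 -> 1``, ... ``2400 -> 1439``.
--     """
--     if value == 2400:
--         return 1439
--     hh = value // 100
--     mm = value % 100
--     return hh * 60 + mm - 1
--
-- def minute_index_to_hhmm(idx: int) -> int:
--     """Inverse of ``hhmm_to_minute_index``: 0-based index back to HHMM.
--
--     ``0 -> 0001``, ``1 -> 0002``, ... ``1439 -> 2400``.
--     """
--     total = idx + 1
--     hh = total // 60
--     mm = total % 60
--     return hh * 100 + mm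
--
-- def expand_hhmm_ranges(ranges_text: str) -> list[int]:
--     """Inverse of ``compress_hhmm_ranges``: expand a range string back to
--     individual HHMM integers.
--
--     ``"1-3;100"`` -> ``[1, 2, 3, 100]``.
--     """
--     expanded: list[int] = []
--     if not ranges_text or ranges_text == "NONE":
--         return expanded
--
--     for token in ranges_text.split(";"):
--         item = token.strip()
--         if not item:
--             continue
--         if "-" in item:
--             start_text, end_text = item.split("-", 1)
--             start = parse_int(start_text)
--             end = parse_int(end_text)
--             if start is None or end is None:
--                 continue
--             if not (is_valid_hhmm(start) and is_valid_hhmm(end)):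
--                 continue
--             start_idx = hhmm_to_minute_index(start)
--             end_idx = hhmm_to_minute_index(end)
--             if end_idx < start_idx:
--                 start_idx, end_idx = end_idx, start_idx
--             for idx in range(start_idx, end_idx + 1):
--                 expanded.append(minute_index_to_hhmm(idx))
--         else:
--             value = parse_int(item)
--             if value is not None and is_valid_hhmm(value):
--                 expanded.append(value)
--     return expanded
-- ===== SOURCE B (Python) =====
-- def parse_int(value: str) -> int | None:
--     """Try to convert a string to an integer; return None instead of raising."""
--     try:
--         return int(value.strip())
--     except ValueError:
--         return None
--
-- def is_valid_hhmm(value: int) -> bool: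
--     """Return True if *value* is a legal HHMM timestamp (0001--2359 or 2400)."""
--     return value == 2400 or (1 <= value <= 2359 and value % 100 <= 59)
--
-- def _interval(item: str):
--     """Parse one token into an ordered (lo, hi) pair of valid endpoints, or None."""
--     if "-" in item:
--         a_text, b_text = item.split("-", 1)
--         a, b = parse_int(a_text), parse_int(b_text)
--         if a is None or b is None or not (is_valid_hhmm(a) and is_valid_hhmm(b)):
--             return None
--         return (a, b) if a <= b else (b, a)
--     v = parse_int(item)
--     return (v, v) if v is not None and is_valid_hhmm(v) else None
--
-- def expand_hhmm_ranges(ranges_text: str) -> list[int]: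
--     """Expand a range string back to individual HHMM integers.
--
--     Two staged passes: parse every token into an ordered endpoint interval,
--     then expand each interval by scanning the integer span and keeping the
--     valid HHMM values. No minute-index conversion is needed.
--     """
--     if not ranges_text or ranges_text == "NONE":
--         return []
--     intervals = [_interval(t.strip()) for t in ranges_text.split(";") if t.strip()]
--     return [v for iv in intervals if iv is not None
--               for v in range(iv[0], iv[1] + 1) if is_valid_hhmm(v)]
-- ===== Notes on version B (the rewrite author's own statement) =====
-- stated objective: simpler
-- what changed: B drops the minute-index round-trip (hhmm_to_minute_index/minute_index_to_hhmm) and restructures the single accumulator loop into two staged passes: every token (range or single value) is first parsed into an ordered (lo, hi) interval or None, then each interval is expanded by scanning the integer span [lo, hi] and keeping the values that pass is_valid_hhmm.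
import Mathlib
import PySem

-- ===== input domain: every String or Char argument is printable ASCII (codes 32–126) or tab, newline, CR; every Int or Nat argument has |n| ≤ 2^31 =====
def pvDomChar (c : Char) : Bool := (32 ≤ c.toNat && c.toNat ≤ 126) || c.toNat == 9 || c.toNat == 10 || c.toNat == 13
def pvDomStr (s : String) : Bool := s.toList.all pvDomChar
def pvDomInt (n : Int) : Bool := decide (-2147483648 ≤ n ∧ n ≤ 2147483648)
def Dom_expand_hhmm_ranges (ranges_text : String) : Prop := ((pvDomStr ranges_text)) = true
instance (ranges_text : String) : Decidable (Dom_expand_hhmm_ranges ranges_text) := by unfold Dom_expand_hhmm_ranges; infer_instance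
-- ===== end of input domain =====

-- B replaces A's single accumulator loop with minute-index round-trips by two staged passes:
-- parse each token into an ordered endpoint interval, then expand each interval by an
-- is_valid_hhmm-filtered integer scan (objective: simpler).


-- ===== PORT A =====
-- parse_int(value): int(value.strip()); ValueError -> None
def pvParseInt (value : String) : Option Int := PySem.Int.ofStr? (PySem.Str.strip value)

-- is_valid_hhmm(value)
def pvIsValidHHMM (value : Int) : Bool :=
  if value = 2400 then true
  else if value < 1 ∨ value > 2359 then false
  else
    let hh := PySem.Int.floordiv value 100
    let mm := PySem.Int.mod value 100
    decide (0 ≤ hh ∧ hh ≤ 23) && decide (0 ≤ mm ∧ mm ≤ 59)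

-- hhmm_to_minute_index(value)
def pvH2M (value : Int) : Int :=
  if value = 2400 then 1439
  else PySem.Int.floordiv value 100 * 60 + PySem.Int.mod value 100 - 1

-- minute_index_to_hhmm(idx)
def pvM2H (idx : Int) : Int :=
  let total := idx + 1
  PySem.Int.floordiv total 60 * 100 + PySem.Int.mod total 60

-- A's range expansion: swap the minute indices if needed, then map range(start_idx, end_idx+1)
def pvExpandA (start stop : Int) : List Int :=
  let start_idx := pvH2M start
  let end_idx := pvH2M stop
  let p := if end_idx < start_idx then (end_idx, start_idx) else (start_idx, end_idx)
  (PySem.List.pyRange p.1 (p.2 + 1) 1).map pvM2H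

-- parse both endpoint texts; skip on None or invalid, else append A's expansion
def pvRangeExpandA (expanded : List Int) (start_text end_text : String) : List Int :=
  match pvParseInt start_text, pvParseInt end_text with
  | some start, some stop =>
    if pvIsValidHHMM start && pvIsValidHHMM stop then expanded ++ pvExpandA start stop
    else expanded
  | _, _ => expanded

-- A's "-" branch: item.split("-", 1) always yields ≥ 2 parts here ("-" ∈ item), so the
-- fallthrough arms (Python's unreachable unpacking error) are never taken
def pvRangeBranchA (expanded : List Int) (item : String) : List Int :=
  match PySem.Str.splitMax? item "-" 1 with
  | some (start_text :: end_text :: _) => pvRangeExpandA expanded start_text end_text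
  | _ => expanded

-- A's single-value branch
def pvSingleBranchA (expanded : List Int) (item : String) : List Int :=
  match pvParseInt item with
  | some value => if pvIsValidHHMM value then expanded ++ [value] else expanded
  | none => expanded

-- the body of A's `for token in …` loop
def pvStepA (expanded : List Int) (token : String) : List Int :=
  let item := PySem.Str.strip token
  if item = "" then expanded
  else if PySem.Str.isIn "-" item then pvRangeBranchA expanded item
  else pvSingleBranchA expanded item

def expand_hhmm_ranges (ranges_text : String) : List Int :=
  if ranges_text = "" ∨ ranges_text = "NONE" then []
  else ((PySem.Str.split? ranges_text ";").getD []).foldl pvStepA []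

-- ===== PORT B =====
-- Source B's parse_int (same one-line helper, kept separate for B)
def pvParseIntB (value : String) : Option Int := PySem.Int.ofStr? (PySem.Str.strip value)

-- Source B's is_valid_hhmm: one boolean formula
def pvIsValidAlt (value : Int) : Bool :=
  value == 2400 || (decide (1 ≤ value) && decide (value ≤ 2359) && decide (PySem.Int.mod value 100 ≤ 59))

-- Source B's _interval: one token -> ordered pair of valid endpoints, or none
def pvInterval? (item : String) : Option (Int × Int) :=
  if PySem.Str.isIn "-" item then
    match PySem.Str.splitMax? item "-" 1 with
    | some (a_text :: b_text :: _) =>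
      match pvParseIntB a_text, pvParseIntB b_text with
      | some a, some b =>
        if pvIsValidAlt a && pvIsValidAlt b then
          some (if a ≤ b then (a, b) else (b, a))
        else none
      | _, _ => none
    | _ => none
  else
    match pvParseIntB item with
    | some v => if pvIsValidAlt v then some (v, v) else none
    | none => none

-- stage 2: expand one parsed interval (none -> nothing)
def pvExpandIv (iv : Option (Int × Int)) : List Int :=
  match iv with
  | some (lo, hi) => (PySem.List.pyRange lo (hi + 1) 1).filter pvIsValidAlt
  | none => []

def expand_hhmm_ranges_alt (ranges_text : String) : List Int :=
  if ranges_text = "" ∨ ranges_text = "NONE" then []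
  else
    let intervals :=
      ((((PySem.Str.split? ranges_text ";").getD []).filter
          (fun t => PySem.Str.strip t ≠ "")).map
        (fun t => pvInterval? (PySem.Str.strip t)))
    intervals.flatMap pvExpandIv

-- ===== PRECONDITION & SPEC =====
def Spec_expand_hhmm_ranges (ranges_text : String) (out : List Int) : Prop := out = expand_hhmm_ranges_alt ranges_text
instance (ranges_text : String) (out : List Int) : Decidable (Spec_expand_hhmm_ranges ranges_text out) := by unfold Spec_expand_hhmm_ranges; infer_instance

-- ===== CLAIM =====
def Claim_equal_expand_hhmm_ranges : Prop := ∀ (ranges_text : String), Dom_expand_hhmm_ranges ranges_text → Spec_expand_hhmm_ranges ranges_text (expand_hhmm_ranges ranges_text)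

-- ===== LEMMAS AND PROOFS =====

theorem pvValidAlt_iff (v : Int) :
    pvIsValidAlt v = true ↔ v = 2400 ∨ (1 ≤ v ∧ v ≤ 2359 ∧ v % 100 ≤ 59) := by
  unfold pvIsValidAlt
  simp only [PySem.Int.mod_eq_emod_of_pos (b := 100) (by norm_num : (0:Int) < 100),
    Bool.or_eq_true, Bool.and_eq_true, beq_iff_eq, decide_eq_true_eq]
  omega

theorem pvValid_iff (v : Int) :
    pvIsValidHHMM v = true ↔ v = 2400 ∨ (1 ≤ v ∧ v ≤ 2359 ∧ v % 100 ≤ 59) := by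
  unfold pvIsValidHHMM
  simp only [PySem.Int.floordiv_eq_ediv_of_pos (b := 100) (by norm_num : (0:Int) < 100),
    PySem.Int.mod_eq_emod_of_pos (b := 100) (by norm_num : (0:Int) < 100)]
  split_ifs with h1 h2 <;> simp <;> omega

theorem pvValidAlt_eq (v : Int) : pvIsValidAlt v = pvIsValidHHMM v := by
  rw [Bool.eq_iff_iff, pvValidAlt_iff, pvValid_iff]

theorem pvM2H_eq (i : Int) : pvM2H i = (i + 1) / 60 * 100 + (i + 1) % 60 := by
  show PySem.Int.floordiv (i + 1) 60 * 100 + PySem.Int.mod (i + 1) 60 = _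
  rw [PySem.Int.floordiv_eq_ediv_of_pos (by norm_num), PySem.Int.mod_eq_emod_of_pos (by norm_num)]

theorem pvH2M_eq (v : Int) :
    pvH2M v = if v = 2400 then 1439 else v / 100 * 60 + v % 100 - 1 := by
  unfold pvH2M
  rw [PySem.Int.floordiv_eq_ediv_of_pos (by norm_num), PySem.Int.mod_eq_emod_of_pos (by norm_num)]

theorem pvM2H_strictMono : StrictMono pvM2H := by
  apply strictMono_int_of_lt_succ
  intro n
  rw [pvM2H_eq, pvM2H_eq]
  omega

theorem pvH2M_props (v : Int) (h : pvIsValidHHMM v = true) :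
    pvM2H (pvH2M v) = v ∧ 0 ≤ pvH2M v ∧ pvH2M v ≤ 1439 := by
  rw [pvValid_iff] at h
  rw [pvH2M_eq]
  rcases h with h | h
  · subst h; refine ⟨by decide, by decide, by decide⟩
  · rw [if_neg (by omega), pvM2H_eq]
    omega

theorem pvM2H_props (i : Int) (h0 : 0 ≤ i) (h1 : i ≤ 1439) :
    pvIsValidHHMM (pvM2H i) = true ∧ pvH2M (pvM2H i) = i := by
  rw [pvValid_iff, pvH2M_eq, pvM2H_eq]
  constructor
  · omega
  · split_ifs with h <;> omega

-- the heart: mapping minute indices back over range(g s, g e + 1) equals scanning [s, e] and filtering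
theorem pvScan (s e : Int) (hs : pvIsValidHHMM s = true) (he : pvIsValidHHMM e = true)
    (_hle : s ≤ e) :
    (PySem.List.pyRange (pvH2M s) (pvH2M e + 1) 1).map pvM2H
      = (PySem.List.pyRange s (e + 1) 1).filter pvIsValidHHMM := by
  obtain ⟨hfs, hs0, hs1⟩ := pvH2M_props s hs
  obtain ⟨hfe, he0, he1⟩ := pvH2M_props e he
  apply List.Perm.eq_of_pairwise (le := (· < ·)) (fun a b _ _ h1 h2 => absurd h1 (not_lt.2 h2.le))
  · exact (PySem.List.pairwise_lt_pyRange_one _ _).map pvM2H (fun _ _ h => pvM2H_strictMono h)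
  · exact (PySem.List.pairwise_lt_pyRange_one _ _).filter _
  · have nd1 : ((PySem.List.pyRange (pvH2M s) (pvH2M e + 1) 1).map pvM2H).Nodup :=
      ((PySem.List.pairwise_lt_pyRange_one _ _).map pvM2H (fun _ _ h => pvM2H_strictMono h)).imp ne_of_lt
    have nd2 : ((PySem.List.pyRange s (e + 1) 1).filter pvIsValidHHMM).Nodup :=
      ((PySem.List.pairwise_lt_pyRange_one _ _).filter _).imp ne_of_lt
    rw [List.perm_ext_iff_of_nodup nd1 nd2]
    intro x
    simp only [List.mem_map, List.mem_filter, PySem.List.mem_pyRange_one]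
    constructor
    · rintro ⟨i, ⟨hli, hri⟩, rfl⟩
      have hvi := pvM2H_props i (by omega) (by omega)
      refine ⟨⟨?_, ?_⟩, hvi.1⟩
      · have := pvM2H_strictMono.monotone hli
        rw [hfs] at this; exact this
      · have : pvM2H i ≤ pvM2H (pvH2M e) := pvM2H_strictMono.monotone (by omega)
        rw [hfe] at this; omega
    · rintro ⟨⟨hlx, hrx⟩, hvx⟩
      obtain ⟨hfx, hx0, hx1⟩ := pvH2M_props x hvx
      refine ⟨pvH2M x, ⟨?_, ?_⟩, hfx⟩
      · have : pvM2H (pvH2M s) ≤ pvM2H (pvH2M x) := by rw [hfs, hfx]; exact hlx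
        exact pvM2H_strictMono.le_iff_le.mp this
      · have : pvM2H (pvH2M x) ≤ pvM2H (pvH2M e) := by rw [hfx, hfe]; omega
        have := pvM2H_strictMono.le_iff_le.mp this
        omega

-- A's range expansion equals B's expansion of the ordered interval
theorem pvExpandA_eq (s e : Int) (hs : pvIsValidHHMM s = true) (he : pvIsValidHHMM e = true) :
    pvExpandA s e = pvExpandIv (some (if s ≤ e then (s, e) else (e, s))) := by
  unfold pvExpandA pvExpandIv
  have hfun : pvIsValidAlt = pvIsValidHHMM := funext pvValidAlt_eq
  rw [hfun]
  show (PySem.List.pyRange (if pvH2M e < pvH2M s then (pvH2M e, pvH2M s) else (pvH2M s, pvH2M e)).1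
        ((if pvH2M e < pvH2M s then (pvH2M e, pvH2M s) else (pvH2M s, pvH2M e)).2 + 1)).map pvM2H
      = (PySem.List.pyRange (if s ≤ e then (s, e) else (e, s)).1
        ((if s ≤ e then (s, e) else (e, s)).2 + 1)).filter pvIsValidHHMM
  by_cases hle : s ≤ e
  · have hi : ¬ pvH2M e < pvH2M s := not_lt.2 (pvM2H_strictMono.le_iff_le.mp
      (by rw [(pvH2M_props s hs).1, (pvH2M_props e he).1]; exact hle))
    rw [if_neg hi, if_pos hle]
    exact pvScan s e hs he hle
  · have hlt : e < s := not_le.mp hle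
    have hi : pvH2M e < pvH2M s := pvM2H_strictMono.lt_iff_lt.mp
      (by rw [(pvH2M_props s hs).1, (pvH2M_props e he).1]; exact hlt)
    rw [if_pos hi, if_neg hle]
    exact pvScan e s he hs hlt.le

-- proof-only bridge: what one token of A's loop contributes, phrased through B's stages
def pvTokOut (token : String) : List Int :=
  let item := PySem.Str.strip token
  if item = "" then [] else pvExpandIv (pvInterval? item)

theorem pvParseIntB_eq (v : String) : pvParseIntB v = pvParseInt v := rfl

theorem pvStepA_eq (acc : List Int) (token : String) :
    pvStepA acc token = acc ++ pvTokOut token := by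
  unfold pvStepA pvTokOut
  by_cases h1 : PySem.Str.strip token = ""
  · simp [h1]
  · rw [if_neg h1, if_neg h1]
    by_cases h2 : PySem.Str.isIn "-" (PySem.Str.strip token) = true
    · rw [if_pos h2]
      unfold pvRangeBranchA pvInterval?
      rw [if_pos h2]
      generalize PySem.Str.splitMax? (PySem.Str.strip token) "-" 1 = parts
      rcases parts with _ | ⟨_ | ⟨a_text, _ | ⟨b_text, rest⟩⟩⟩
      · simp [pvExpandIv]
      · simp [pvExpandIv]
      · simp [pvExpandIv]
      · dsimp only
        unfold pvRangeExpandA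
        rw [pvParseIntB_eq, pvParseIntB_eq]
        generalize pvParseInt a_text = oa
        generalize pvParseInt b_text = ob
        rcases oa with _ | a
        · rcases ob with _ | b <;> simp [pvExpandIv]
        · rcases ob with _ | b
          · simp [pvExpandIv]
          · simp only [pvValidAlt_eq]
            by_cases hv : (pvIsValidHHMM a && pvIsValidHHMM b) = true
            · rw [if_pos hv, if_pos hv]
              obtain ⟨ha, hb⟩ := Bool.and_eq_true_iff.mp hv
              rw [pvExpandA_eq a b ha hb]
            · rw [if_neg hv, if_neg hv]
              simp [pvExpandIv]
    · rw [if_neg h2]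
      unfold pvSingleBranchA pvInterval?
      rw [if_neg h2, pvParseIntB_eq]
      generalize pvParseInt (PySem.Str.strip token) = ov
      rcases ov with _ | v
      · simp [pvExpandIv]
      · simp only [pvValidAlt_eq]
        by_cases hv : pvIsValidHHMM v = true
        · rw [if_pos hv, if_pos hv]
          unfold pvExpandIv
          dsimp only
          rw [PySem.List.pyRange_one_singleton]
          simp [List.filter, pvValidAlt_eq, hv]
        · rw [if_neg hv, if_neg hv]
          simp [pvExpandIv]

theorem pvFoldA_eq (toks : List String) (acc : List Int) :
    toks.foldl pvStepA acc = acc ++ toks.flatMap pvTokOut := by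
  induction toks generalizing acc with
  | nil => simp
  | cons t ts ih =>
    simp only [List.foldl_cons, List.flatMap_cons, pvStepA_eq, ih, List.append_assoc]

theorem pvPipelineB_eq (toks : List String) :
    ((toks.filter (fun t => PySem.Str.strip t ≠ "")).map
        (fun t => pvInterval? (PySem.Str.strip t))).flatMap pvExpandIv
      = toks.flatMap pvTokOut := by
  induction toks with
  | nil => rfl
  | cons t ts ih =>
    by_cases h : PySem.Str.strip t = ""
    · simp only [List.filter_cons, List.flatMap_cons]
      rw [if_neg (by simp [h]), ih]
      simp [pvTokOut, h]
    · simp only [List.filter_cons, List.flatMap_cons]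
      rw [if_pos (by simp [h]), List.map_cons, List.flatMap_cons, ih]
      simp [pvTokOut, h]

-- ===== VERDICT =====
theorem expand_hhmm_ranges_spec : Claim_equal_expand_hhmm_ranges := by
  intro ranges_text _
  unfold Spec_expand_hhmm_ranges expand_hhmm_ranges expand_hhmm_ranges_alt
  by_cases h : ranges_text = "" ∨ ranges_text = "NONE"
  · rw [if_pos h, if_pos h]
  · rw [if_neg h, if_neg h]
    rw [pvFoldA_eq, pvPipelineB_eq, List.nil_append]
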